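-- pv_equiv track=rewrite | github.com/A-Ulkryxx/CS220 | RecitationCode/Zybook2_8Lab.py | is_proper_subset
-- ===== SOURCE A (Python) =====
-- def set_membership(s, value):
--     """Return True if value is in the set s, and False otherwise"""
--     if type(s)!=type([]) :
--         raise ValueError
--
--     for i in s:
--         if (value == i):
--             return True
--
--     return False
--
-- def is_proper_subset(s1, s2) :
--     """Return True if s1 is a proper subset of s2"""
--     if type(s1)!=type([]) or type(s2)!=type([]):
--         raise ValueError
--
--     s1.sort()
--     s2.sort()
--
--     if(len(s1) == 0):
--        return True
--
--     if (len(s1) < len(s2)):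
--         flag = True
--         for i in s1:
--             if(not set_membership(s2, i)):
--                 flag = False
--
--         return flag
--
--     return False
-- ===== SOURCE B (Python) =====
-- def is_proper_subset(s1, s2):
--     """Return True if s1 is a proper subset of s2"""
--     if type(s1) != type([]) or type(s2) != type([]):
--         raise ValueError
--     s1.sort()
--     s2.sort()
--     if len(s1) == 0:
--         return True
--     if len(s1) >= len(s2):
--         return False
--     j = 0
--     for x in s1:
--         while j < len(s2) and s2[j] < x:
--             j += 1
--         if j == len(s2) or s2[j] != x:
--             return False
--     return True
-- ===== Notes on version B (the rewrite author's own statement) =====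
-- stated objective: alternative
-- what changed: After the same in-place sorts and length gates, B replaces the per-element linear membership scans of s2 with a single two-pointer merge walk over the two sorted lists.
import Mathlib
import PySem

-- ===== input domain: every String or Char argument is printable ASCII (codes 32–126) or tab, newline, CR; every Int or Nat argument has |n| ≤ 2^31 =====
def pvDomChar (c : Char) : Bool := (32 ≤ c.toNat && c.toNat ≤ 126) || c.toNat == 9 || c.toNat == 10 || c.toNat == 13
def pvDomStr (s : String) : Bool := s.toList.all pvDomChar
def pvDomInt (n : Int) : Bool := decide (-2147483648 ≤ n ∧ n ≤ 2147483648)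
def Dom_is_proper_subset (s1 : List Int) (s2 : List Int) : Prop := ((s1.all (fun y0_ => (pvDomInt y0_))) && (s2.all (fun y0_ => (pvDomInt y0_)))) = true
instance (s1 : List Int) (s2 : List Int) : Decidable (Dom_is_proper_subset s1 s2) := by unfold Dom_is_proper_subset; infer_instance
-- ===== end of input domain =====

-- B replaces A's per-element linear membership scans with one two-pointer merge walk over the
-- sorted lists (same in-place sorts on the Python side: both A and B sort s1 and s2, an
-- observable mutation; the equivalence proved here is about the return value).


-- ===== PORT A =====
def set_membership : List Int → Int → Bool
  | [], _ => false
  | i :: rest, value => if value == i then true else set_membership rest value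

def is_proper_subset (s1 : List Int) (s2 : List Int) : Bool :=
  let s1' := PySem.List.sorted s1 (fun x => x) false
  let s2' := PySem.List.sorted s2 (fun x => x) false
  if s1'.length == 0 then true
  else if s1'.length < s2'.length then
    s1'.foldl (fun flag i => if !(set_membership s2' i) then false else flag) true
  else false

-- ===== PORT B =====
-- the two-pointer walk over the sorted lists (B's for-loop over s1 with pointer j into s2,
-- here as recursion on the remaining suffixes)
def pvWalk : List Int → List Int → Bool
  | [], _ => true
  | _ :: _, [] => false
  | x :: xs, y :: ys =>
    if y < x then pvWalk (x :: xs) ys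
    else if y == x then pvWalk xs (y :: ys)
    else false
termination_by a b => (a.length, b.length)

def is_proper_subset_alt (s1 : List Int) (s2 : List Int) : Bool :=
  let s1' := PySem.List.sorted s1 (fun x => x) false
  let s2' := PySem.List.sorted s2 (fun x => x) false
  if s1'.length = 0 then true
  else if s1'.length ≥ s2'.length then false
  else pvWalk s1' s2'

-- ===== PRECONDITION & SPEC =====
def Spec_is_proper_subset (s1 : List Int) (s2 : List Int) (out : Bool) : Prop := out = is_proper_subset_alt s1 s2
instance (s1 : List Int) (s2 : List Int) (out : Bool) : Decidable (Spec_is_proper_subset s1 s2 out) := by unfold Spec_is_proper_subset; infer_instance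

-- ===== CLAIM (what is proved, stated in full; the proofs are below) =====
def Claim_equal_is_proper_subset : Prop := ∀ (s1 : List Int) (s2 : List Int), Dom_is_proper_subset s1 s2 → Spec_is_proper_subset s1 s2 (is_proper_subset s1 s2)

-- ===== LEMMAS AND PROOFS =====

theorem set_membership_cons (i : Int) (rest : List Int) (value : Int) :
    set_membership (i :: rest) value = if value == i then true else set_membership rest value := rfl

theorem set_membership_eq_true_iff (s : List Int) (v : Int) : set_membership s v = true ↔ v ∈ s := by
  induction s with
  | nil => simp [set_membership]
  | cons i rest ih =>
    by_cases h : v = i <;> simp [set_membership, h, ih]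

theorem all_congr_mem {l : List Int} {f g : Int → Bool} (h : ∀ x ∈ l, f x = g x) :
    l.all f = l.all g := by
  induction l with
  | nil => rfl
  | cons a t ih =>
    simp only [List.all_cons]
    rw [h a (by simp), ih (fun x hx => h x (by simp [hx]))]

theorem foldl_flag (b : List Int) (a : List Int) (f : Bool) :
    a.foldl (fun flag i => if !(set_membership b i) then false else flag) f
      = (f && a.all (fun i => set_membership b i)) := by
  induction a generalizing f with
  | nil => simp
  | cons x xs ih =>
    simp only [List.foldl_cons, List.all_cons]
    rw [ih]
    by_cases h : set_membership b x = true <;> simp [h]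

theorem walk_eq (a b : List Int) (ha : a.Pairwise (· ≤ ·)) (hb : b.Pairwise (· ≤ ·)) :
    pvWalk a b = a.all (fun x => set_membership b x) := by
  fun_induction pvWalk a b with
  | case1 b => simp
  | case2 x xs => simp [set_membership]
  | case3 x xs y ys hlt ih =>
    rw [ih ha (List.Pairwise.of_cons hb)]
    refine (all_congr_mem ?_).symm
    intro z hz
    have hxz : x ≤ z := by
      rcases List.mem_cons.mp hz with hz | hz
      · simp [hz]
      · exact (List.pairwise_cons.mp ha).1 z hz
    have hzy : z ≠ y := by omega
    simp only [set_membership_cons, beq_iff_eq, if_neg hzy]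
  | case4 x xs y ys hlt heq ih =>
    have hxy : x = y := (beq_iff_eq.mp heq).symm
    rw [ih (List.Pairwise.of_cons ha) hb]
    subst hxy
    rw [List.all_cons, show set_membership (x :: ys) x = true by rw [set_membership_cons]; simp]
    simp
  | case5 x xs y ys hlt hne =>
    have hxlt : x < y := by
      have : ¬ y = x := by simpa using hne
      omega
    have hmem : set_membership (y :: ys) x = false := by
      rw [Bool.eq_false_iff, Ne, set_membership_eq_true_iff]
      intro hx
      rcases List.mem_cons.mp hx with hx | hx
      · omega
      · have := (List.pairwise_cons.mp hb).1 x hx; omega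
    simp [List.all_cons, hmem]

-- ===== VERDICT (by name: the statement is the Claim_ definition above) =====
theorem is_proper_subset_spec : Claim_equal_is_proper_subset := by
  intro s1 s2 _
  unfold Spec_is_proper_subset is_proper_subset is_proper_subset_alt
  have h1 := PySem.List.sorted_pairwise (xs := s1) (key := fun x => x)
  have h2 := PySem.List.sorted_pairwise (xs := s2) (key := fun x => x)
  set a := PySem.List.sorted s1 (fun x => x) false with hA
  set b := PySem.List.sorted s2 (fun x => x) false with hB
  simp only [beq_iff_eq, ge_iff_le]
  by_cases hz : a.length = 0
  · simp [hz]
  · by_cases hlen : a.length < b.length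
    · simp only [if_neg hz, if_pos hlen, if_neg (by omega : ¬ b.length ≤ a.length)]
      rw [foldl_flag, walk_eq a b h1 h2, Bool.true_and]
    · simp [hz, hlen, (by omega : b.length ≤ a.length)]
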